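-- pv_equiv track=rewrite | github.com/travisoneill/project-euler | 549.py | f
-- ===== SOURCE A (Python) =====
-- def f(n, b):
--     m = n
--     total = 0
--     while n > 0:
--         i, e = 0, 0
--         while True:
--             x = b**e
--             if i + x > n: break
--             i += x
--             e += 1
--         n -= i
--         total += x
--     return total
-- ===== SOURCE B (Python) =====
-- def f(n, b):
--     if n <= 0:
--         return 0
--     if b == 1:
--         return 1
--     levels = []
--     s, x = 1, b
--     while s <= n:
--         levels.append((s, x))
--         s, x = s + x, x * b
--     total = 0
--     for s, x in reversed(levels):
--         q, n = divmod(n, s)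
--         total += q * x
--     return total
-- ===== Notes on version B (the rewrite author's own statement) =====
-- stated objective: faster
-- what changed: Instead of rebuilding the geometric sum from scratch and subtracting it once per outer iteration, B builds the list of geometric sums up to n once and then processes each level exactly once with a single divmod that bulk-performs all of A's subtractions at that level (b==1 and n<=0 handled by direct cases).
import Mathlib
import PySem

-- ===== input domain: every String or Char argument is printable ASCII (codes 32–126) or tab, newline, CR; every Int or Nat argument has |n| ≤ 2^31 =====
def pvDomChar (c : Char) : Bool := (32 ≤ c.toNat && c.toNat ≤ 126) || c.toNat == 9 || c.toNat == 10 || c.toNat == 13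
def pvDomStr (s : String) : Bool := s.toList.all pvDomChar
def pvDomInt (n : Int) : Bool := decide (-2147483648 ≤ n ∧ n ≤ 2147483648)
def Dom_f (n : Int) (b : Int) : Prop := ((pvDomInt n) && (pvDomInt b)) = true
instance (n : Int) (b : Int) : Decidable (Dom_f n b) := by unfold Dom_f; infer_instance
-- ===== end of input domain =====

-- B replaces A's one-subtraction-per-iteration greedy loop by a build-levels-once pass
-- plus one divmod per level (bulk subtraction); a timing run reports it faster.

-- ===== PORT A =====
-- inner 'while True' loop of A: accumulates i += b**e until i + b**e > n, returns (i, x).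
-- The 'b ^ e ≤ 0' branch is a totality guard only: for b ≥ 1 (Pre_) it never fires.
def fInner (n b i : Int) (e : Nat) : Int × Int :=
  if h1 : i + b ^ e > n then (i, b ^ e)
  else if h2 : b ^ e ≤ 0 then (i, b ^ e)
  else fInner n b (i + b ^ e) (e + 1)
termination_by (n - i).toNat
decreasing_by omega

-- outer 'while n > 0' loop of A (A's unused 'm = n' is dropped).  The '≤ 0' branch is a
-- totality guard only: for n > 0 the inner loop absorbs b^0 = 1, so it never fires.
def fOuter (n b total : Int) : Int :=
  if h : 0 < n then
    if hg : (fInner n b 0 0).1 ≤ 0 then total + (fInner n b 0 0).2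
    else fOuter (n - (fInner n b 0 0).1) b (total + (fInner n b 0 0).2)
  else total
termination_by n.toNat
decreasing_by omega

def f (n : Int) (b : Int) : Int := fOuter n b 0

-- ===== PORT B =====
-- the 'while s <= n' loop of B building the level list [(s_k, b^k)].
-- The 'x ≤ 0' branch is a totality guard only: for b ≥ 2 x = b^k ≥ 1 and it never fires.
def levelsB (n b s x : Int) : List (Int × Int) :=
  if hsn : s ≤ n then
    if hx : x ≤ 0 then []
    else (s, x) :: levelsB n b (s + x) (x * b)
  else []
termination_by (n + 1 - s).toNat
decreasing_by omega

def f_alt (n : Int) (b : Int) : Int :=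
  if n ≤ 0 then 0
  else if b = 1 then 1
  else
    (((levelsB n b 1 b).reverse).foldl
      (fun (st : Int × Int) (p : Int × Int) =>
        (st.1 + PySem.Int.floordiv st.2 p.1 * p.2, PySem.Int.mod st.2 p.1))
      (0, n)).1

-- ===== PRECONDITION & SPEC =====
-- Pre_ excludes only the inputs (n > 0 with b ≤ 0) on which Python A loops forever (returns nothing).
def Pre_f (n : Int) (b : Int) : Prop := n ≤ 0 ∨ 1 ≤ b
instance (n : Int) (b : Int) : Decidable (Pre_f n b) := by unfold Pre_f; infer_instance
def pvWitness_f : Int × Int := (10, 2)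

def Spec_f (n : Int) (b : Int) (out : Int) : Prop := out = f_alt n b
instance (n : Int) (b : Int) (out : Int) : Decidable (Spec_f n b out) := by unfold Spec_f; infer_instance

-- ===== CLAIM (what is proved, stated in full; the proofs are below) =====
def Claim_equal_f : Prop := ∀ (n : Int) (b : Int), Dom_f n b → Pre_f n b → Spec_f n b (f n b)

-- ===== LEMMAS AND PROOFS =====

-- geometric sum S b k = b^0 + … + b^(k-1), the value A's inner loop accumulates.
def S (b : Int) : Nat → Int
  | 0 => 0
  | k + 1 => S b k + b ^ k

lemma one_le_pow_int {b : Int} (hb : 1 ≤ b) (e : Nat) : 1 ≤ b ^ e :=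
  one_le_pow₀ hb

lemma S_le_S {b : Int} (hb : 1 ≤ b) {j k : Nat} (h : j ≤ k) : S b j ≤ S b k := by
  induction k with
  | zero => have hj : j = 0 := by omega
            simp [hj]
  | succ k ih =>
    rcases Nat.lt_or_ge j (k + 1) with h' | h'
    · have h1 := ih (by omega)
      have h2 := one_le_pow_int hb k
      simp only [S]; omega
    · have hj : j = k + 1 := by omega
      simp [hj]

lemma self_le_S {b : Int} (hb : 1 ≤ b) (k : Nat) : (k : Int) ≤ S b k := by
  induction k with
  | zero => simp [S]
  | succ k ih =>
    have := one_le_pow_int hb k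
    simp only [S]; push_cast; omega

lemma S_one (k : Nat) : S 1 k = (k : Int) := by
  induction k with
  | zero => simp [S]
  | succ k ih => simp only [S, ih, one_pow]; push_cast; ring

lemma exists_level {b n : Int} (hb : 1 ≤ b) (hn : 0 ≤ n) :
    ∃ K : Nat, S b K ≤ n ∧ n < S b (K + 1) := by
  have hex : ∃ k : Nat, n < S b k := by
    refine ⟨n.toNat + 1, ?_⟩
    have := self_le_S hb (n.toNat + 1)
    push_cast at this; omega
  classical
  have hk : n < S b (Nat.find hex) := Nat.find_spec hex
  have hk0 : Nat.find hex ≠ 0 := by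
    intro h
    rw [h] at hk
    simp [S] at hk; omega
  refine ⟨Nat.find hex - 1, ?_, ?_⟩
  · have := Nat.find_min hex (m := Nat.find hex - 1) (by omega)
    omega
  · have h1 : Nat.find hex - 1 + 1 = Nat.find hex := by omega
    rw [h1]; exact hk

-- characterization of A's inner loop
lemma fInner_at {b n : Int} (hb : 1 ≤ b) (K : Nat) (hK : S b K ≤ n) (hK1 : n < S b (K + 1)) :
    ∀ (d e : Nat), e + d = K → fInner n b (S b e) e = (S b K, b ^ K) := by
  intro d
  induction d with
  | zero =>
    intro e he
    have he' : e = K := by omega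
    subst he'
    rw [fInner.eq_def]
    have h1 : S b e + b ^ e > n := by
      have hs : S b (e + 1) = S b e + b ^ e := rfl
      omega
    simp [h1]
  | succ d ih =>
    intro e he
    rw [fInner.eq_def]
    have hle : S b (e + 1) ≤ S b K := S_le_S hb (by omega)
    have hstep : S b (e + 1) = S b e + b ^ e := rfl
    have h1 : ¬ (S b e + b ^ e > n) := by omega
    have h2 : ¬ (b ^ e ≤ 0) := by have := one_le_pow_int hb e; omega
    simp only [h1, h2, dite_false]
    rw [← hstep]
    exact ih (e + 1) (by omega)

lemma fOuter_shift {b : Int} : ∀ (m : Nat) (n : Int), n.toNat ≤ m →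
    ∀ t, fOuter n b t = t + fOuter n b 0 := by
  intro m
  induction m with
  | zero =>
    intro n hn t
    have h : ¬ (0 < n) := by omega
    have h0 : fOuter n b 0 = 0 := by rw [fOuter.eq_def]; simp [h]
    rw [fOuter.eq_def]; simp [h, h0]
  | succ m ih =>
    intro n hn t
    by_cases h : 0 < n
    · conv_lhs => rw [fOuter.eq_def]
      conv_rhs => rw [fOuter.eq_def]
      simp only [h, dite_true]
      by_cases hg : (fInner n b 0 0).1 ≤ 0
      · simp only [hg, dite_true]; ring
      · simp only [hg, dite_false]
        rw [ih (n - (fInner n b 0 0).1) (by omega) (t + (fInner n b 0 0).2),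
            ih (n - (fInner n b 0 0).1) (by omega) (0 + (fInner n b 0 0).2)]
        ring
    · have h0 : fOuter n b 0 = 0 := by rw [fOuter.eq_def]; simp [h]
      rw [fOuter.eq_def]; simp [h, h0]

-- bulk-subtraction lemma: all of A's iterations at level j collapse into one divmod
lemma fOuter_level {b : Int} (hb : 1 ≤ b) (j : Nat) (hj : 1 ≤ j) :
    ∀ (m : Nat) (n : Int), n.toNat ≤ m → 0 ≤ n → n < S b (j + 1) →
    fOuter n b 0 = n / S b j * b ^ j + fOuter (n % S b j) b 0 := by
  have hSj := self_le_S hb j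
  have hSpos : 0 < S b j := by omega
  intro m
  induction m with
  | zero =>
    intro n hn h0 _
    have hn0 : n = 0 := by omega
    subst hn0
    simp
  | succ m ih =>
    intro n hn h0 hlt
    by_cases hcase : n < S b j
    · have hdiv : n / S b j = 0 := Int.ediv_eq_zero_of_lt h0 hcase
      have hmod : n % S b j = n := Int.emod_eq_of_lt h0 hcase
      rw [hdiv, hmod]; ring
    · push_neg at hcase
      have hpos : 0 < n := by omega
      rw [fOuter.eq_def]
      simp only [hpos, dite_true]
      have hKeq : fInner n b 0 0 = (S b j, b ^ j) := by
        have := fInner_at hb j hcase hlt j 0 (by omega)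
        simpa [S] using this
      rw [hKeq]
      have hg : ¬ ((S b j, b ^ j).1 ≤ 0) := by simp; omega
      simp only [hg, dite_false]
      have hstep : S b (j + 1) = S b j + b ^ j := rfl
      have hpow : 1 ≤ b ^ j := one_le_pow_int hb j
      have hrec := ih (n - S b j) (by omega) (by omega) (by omega)
      rw [fOuter_shift (m := (n - S b j).toNat) (n - S b j) le_rfl (0 + b ^ j), hrec]
      have hd : (n - S b j) / S b j = n / S b j - 1 := by
        have he : n - S b j = n + (-1) * S b j := by ring
        rw [he, Int.add_mul_ediv_right _ _ (by omega)]; ring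
      have hm : (n - S b j) % S b j = n % S b j := by
        have he : n - S b j = n + (-1) * S b j := by ring
        rw [he, Int.add_mul_emod_self_right]
      rw [hd, hm]; ring

-- B's level list is exactly the levels 1..K
lemma levels_at {b n : Int} (hb : 2 ≤ b) (K : Nat) (hK : S b K ≤ n) (hK1 : n < S b (K + 1)) :
    ∀ (d j : Nat), 1 ≤ j → j + d = K + 1 →
    levelsB n b (S b j) (b ^ j) =
      (List.range' j d).map (fun k => (S b k, b ^ k)) := by
  intro d
  induction d with
  | zero =>
    intro j _ hjd
    have hj : j = K + 1 := by omega
    rw [hj, levelsB.eq_def]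
    simp [not_le.mpr hK1]
  | succ d ih =>
    intro j hj1 hjd
    have hle : S b j ≤ n := le_trans (S_le_S (by omega) (by omega)) hK
    rw [levelsB.eq_def]
    have hpow : 1 ≤ b ^ j := one_le_pow_int (by omega) j
    simp only [hle, dite_true, show ¬ (b ^ j ≤ 0) by omega, dite_false]
    have hstep : S b j + b ^ j = S b (j + 1) := rfl
    have hxp : b ^ j * b = b ^ (j + 1) := by rw [pow_succ]
    rw [hstep, hxp, ih (j + 1) (by omega) (by omega), List.range'_succ]
    simp

-- the descending fold over the levels computes fOuter
lemma fold_desc {b : Int} (hb : 2 ≤ b) :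
    ∀ (K : Nat) (n t : Int), 0 ≤ n → n < S b (K + 1) →
    (((List.range' 1 K).map (fun k => (S b k, b ^ k))).reverse.foldl
      (fun (st : Int × Int) (p : Int × Int) =>
        (st.1 + PySem.Int.floordiv st.2 p.1 * p.2, PySem.Int.mod st.2 p.1))
      (t, n)) = (t + fOuter n b 0, 0) := by
  intro K
  induction K with
  | zero =>
    intro n t h0 hlt
    have h1 : S b (0 + 1) = 1 := by simp [S]
    have hn0 : n = 0 := by omega
    subst hn0
    have h0 : fOuter 0 b 0 = 0 := by rw [fOuter.eq_def]; simp
    simp [h0]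
  | succ K ih =>
    intro n t h0 hlt
    have hSpos : 0 < S b (K + 1) := by
      have := self_le_S (b := b) (by omega) (K + 1); push_cast at this; omega
    have hconc : List.range' 1 (K + 1) = List.range' 1 K ++ [K + 1] := by
      rw [List.range'_concat]; norm_num [Nat.add_comm]
    rw [hconc]
    simp only [List.map_append, List.reverse_append, List.map_cons, List.map_nil,
      List.reverse_cons, List.reverse_nil, List.nil_append, List.cons_append,
      List.foldl_cons]
    have hq : PySem.Int.floordiv n (S b (K + 1)) = n / S b (K + 1) :=
      PySem.Int.floordiv_eq_ediv_of_pos hSpos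
    have hr : PySem.Int.mod n (S b (K + 1)) = n % S b (K + 1) :=
      PySem.Int.mod_eq_emod_of_pos hSpos
    rw [hq, hr]
    have h0' : 0 ≤ n % S b (K + 1) := Int.emod_nonneg n (by omega)
    have hlt' : n % S b (K + 1) < S b (K + 1) := Int.emod_lt_of_pos n hSpos
    rw [ih (n % S b (K + 1)) _ h0' hlt']
    have hl := fOuter_level (b := b) (by omega) (K + 1) (by omega) n.toNat n le_rfl h0 hlt
    rw [hl]
    ring_nf

theorem f_eq_f_alt (n b : Int) (h : Pre_f n b) : f n b = f_alt n b := by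
  rcases (by omega : n ≤ 0 ∨ 0 < n) with hn | hn
  · unfold f f_alt
    rw [fOuter.eq_def]
    simp [show ¬ (0 < n) by omega, show n ≤ 0 from hn]
  · have hb : 1 ≤ b := by rcases h with h | h <;> omega
    obtain ⟨K, hK, hK1⟩ := exists_level hb hn.le
    rcases eq_or_lt_of_le hb with hb1 | hb2
    · -- b = 1
      have hb1' : b = 1 := hb1.symm
      subst hb1'
      rw [S_one] at hK
      rw [S_one] at hK1
      push_cast at hK1
      have hnK : n = (K : Int) := by omega
      have hKpos : 1 ≤ K := by omega
      unfold f f_alt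
      rw [fOuter.eq_def]
      simp only [show 0 < n by omega, dite_true]
      have hI : fInner n 1 0 0 = (S 1 K, 1 ^ K) := by
        have := fInner_at (b := 1) (n := n) le_rfl K (by rw [S_one]; omega)
          (by rw [S_one]; push_cast; omega) K 0 (by omega)
        simpa [S] using this
      rw [hI]
      rw [S_one]
      simp only [one_pow]
      have hg : ¬ ((K : Int) ≤ 0) := by omega
      simp only [hg, dite_false]
      rw [show n - (K : Int) = 0 from by omega]
      have h0 : fOuter 0 1 (0 + 1) = 0 + 1 := by rw [fOuter.eq_def]; simp
      rw [h0]
      simp [show ¬ (n ≤ 0) from by omega]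
    · -- b ≥ 2
      have hb2' : 2 ≤ b := by omega
      unfold f f_alt
      rw [if_neg (show ¬ n ≤ 0 by omega), if_neg (show ¬ b = 1 by omega)]
      have hlv : levelsB n b 1 b = (List.range' 1 K).map (fun k => (S b k, b ^ k)) := by
        have hlv0 := levels_at hb2' K hK hK1 K 1 le_rfl (by omega)
        have h1 : S b 1 = 1 := by simp [S]
        have hx1 : b ^ 1 = b := pow_one b
        rw [h1, hx1] at hlv0
        exact hlv0
      rw [hlv, fold_desc hb2' K n 0 (by omega) hK1]
      simp

-- ===== VERDICT (by name: the statement is the Claim_ definition above) =====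
theorem f_spec : Claim_equal_f := by
  intro n b _ hpre
  unfold Spec_f
  exact f_eq_f_alt n b hpre
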